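-- pv_equiv track=rewrite | github.com/pranavjawale01/LeetCode-GFG | LeetCode/1717-maximum-score-from-removing-substrings/1717-maximum-score-from-removing-substrings.py | solve
-- ===== SOURCE A (Python) =====
-- def solve(s: str, targetStr: str, points: int) -> tuple[int, str]:
--     totalPoints = 0
--     n = len(s)
--     write_idx = 0
--     s = list(s)
--     for read_idx in range(n):
--         s[write_idx] = s[read_idx]
--         write_idx += 1
--         if write_idx > 1 and s[write_idx - 1] == targetStr[1] and s[write_idx - 2] == targetStr[0]:
--             write_idx -= 2
--             totalPoints += points
--
--     s = ''.join(s[:write_idx])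
--     return totalPoints, s
-- ===== SOURCE B (Python) =====
-- def solve(s: str, targetStr: str, points: int) -> tuple[int, str]:
--     a, b = targetStr[0], targetStr[1]
--     totalPoints = 0
--     while True:
--         removed = 0
--         out = []
--         i = 0
--         while i < len(s):
--             if i + 1 < len(s) and s[i] == a and s[i + 1] == b:
--                 removed += 1
--                 i += 2
--             else:
--                 out.append(s[i])
--                 i += 1
--         if removed == 0:
--             break
--         totalPoints += removed * points
--         s = ''.join(out)
--     return totalPoints, s
-- ===== Notes on version B (the rewrite author's own statement) =====
-- stated objective: alternative
-- what changed: Replaces A's single stack-compaction pass over a mutable char array by repeated left-to-right sweeps that each delete all non-overlapping occurrences of the 2-char pair until none remain (confluence of deleting a fixed 2-char pattern makes the final string and removal count identical).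
-- outside the precondition, e.g. on solve('a', 'x', 5): A returns (0, 'a'), B raises IndexError
import Mathlib
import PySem

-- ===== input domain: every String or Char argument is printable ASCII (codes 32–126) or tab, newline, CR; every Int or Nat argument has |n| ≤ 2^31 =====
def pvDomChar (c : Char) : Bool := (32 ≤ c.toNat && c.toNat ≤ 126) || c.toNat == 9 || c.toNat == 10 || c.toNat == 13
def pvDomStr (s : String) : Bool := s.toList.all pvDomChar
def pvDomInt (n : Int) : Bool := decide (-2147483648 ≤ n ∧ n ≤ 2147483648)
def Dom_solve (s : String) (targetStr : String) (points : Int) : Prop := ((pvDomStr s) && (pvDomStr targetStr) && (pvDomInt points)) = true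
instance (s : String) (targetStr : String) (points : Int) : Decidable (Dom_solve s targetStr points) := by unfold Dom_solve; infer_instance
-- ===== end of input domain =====

-- B replaces A's single stack-compaction pass by repeated sweeps deleting all non-overlapping
-- occurrences of the 2-char pair until none remain (alternative algorithm, same results).

-- ===== PORT A =====
-- literal transliteration of A: char list as the mutable array, write_idx compaction.
-- targetStr[1]/targetStr[0] are read with getD: exact on Pre_solve (targetStr has ≥ 2 chars);
-- array reads/writes are getD/set: in range whenever Python's are (write_idx ≤ read_idx < n).
def solveStep (t0 t1 : Char) (st : List Char × Nat × Int) (r : Nat) (p : Int) : List Char × Nat × Int :=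
  let arr := st.1.set st.2.1 (st.1.getD r ' ')
  let w := st.2.1 + 1
  if w > 1 ∧ arr.getD (w - 1) ' ' = t1 ∧ arr.getD (w - 2) ' ' = t0 then
    (arr, w - 2, st.2.2 + p)
  else
    (arr, w, st.2.2)

def solve (s : String) (targetStr : String) (points : Int) : Int × String :=
  let n := s.toList.length
  let t0 := targetStr.toList.getD 0 ' '
  let t1 := targetStr.toList.getD 1 ' '
  let res := (List.range n).foldl (fun st r => solveStep t0 t1 st r points) (s.toList, 0, (0 : Int))
  (res.2.2, String.mk (res.1.take res.2.1))

-- ===== PORT B =====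
-- one left-to-right sweep: count and delete non-overlapping occurrences of [a,b]
def sweep (a b : Char) : List Char → Nat × List Char
  | [] => (0, [])
  | [c] => (0, [c])
  | c :: d :: rest =>
    if c = a ∧ d = b then
      let r := sweep a b rest
      (r.1 + 1, r.2)
    else
      let r := sweep a b (d :: rest)
      (r.1, c :: r.2)

theorem sweep_length (a b : Char) : ∀ cs : List Char, (sweep a b cs).2.length + 2 * (sweep a b cs).1 = cs.length := by
  intro cs
  induction cs using sweep.induct a b with
  | case1 => simp [sweep]
  | case2 c => simp [sweep]
  | case3 c d rest h ih => simp [sweep, h]; omega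
  | case4 c d rest h ih => simp [sweep, h] at ih ⊢; omega

def solveAltLoop (a b : Char) (p : Int) (tot : Int) (cs : List Char) : Int × List Char :=
  if h : (sweep a b cs).1 = 0 then (tot, cs)
  else solveAltLoop a b p (tot + ((sweep a b cs).1 : Int) * p) (sweep a b cs).2
termination_by cs.length
decreasing_by
  have hl := sweep_length a b cs
  omega

def solve_alt (s : String) (targetStr : String) (points : Int) : Int × String :=
  let a := targetStr.toList.getD 0 ' '
  let b := targetStr.toList.getD 1 ' '
  let r := solveAltLoop a b points 0 s.toList
  (r.1, String.mk r.2)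

-- ===== PRECONDITION & SPEC =====
-- Pre_ requires targetStr to have at least 2 characters: A raises IndexError on targetStr[1]
-- whenever len(s) ≥ 2, and B reads targetStr[1] up front, so the remaining short-s inputs on
-- which A still returns (0, s) are excluded as well (see claim cites).
def Pre_solve (s : String) (targetStr : String) (points : Int) : Prop := 2 ≤ targetStr.toList.length
instance (s : String) (targetStr : String) (points : Int) : Decidable (Pre_solve s targetStr points) := by unfold Pre_solve; infer_instance
def pvWitness_solve : String × String × Int := ("abcba", "ab", 3)

def Spec_solve (s : String) (targetStr : String) (points : Int) (out : Int × String) : Prop := out = solve_alt s targetStr points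
instance (s : String) (targetStr : String) (points : Int) (out : Int × String) : Decidable (Spec_solve s targetStr points out) := by unfold Spec_solve; infer_instance

-- ===== CLAIM (what is proved, stated in full; the proofs are below) =====
def Claim_equal_solve : Prop := ∀ (s : String) (targetStr : String) (points : Int), Dom_solve s targetStr points → Pre_solve s targetStr points → Spec_solve s targetStr points (solve s targetStr points)

-- ===== LEMMAS AND PROOFS =====

-- reference machine: the stack automaton with pop counter
def mstep (a b : Char) (st : List Char × Nat) (c : Char) : List Char × Nat :=
  match st with
  | (x :: s, k) => if x = a ∧ c = b then (s, k + 1) else (c :: x :: s, k)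
  | ([], k) => ([c], k)

def mrun (a b : Char) (st : List Char × Nat) (cs : List Char) : List Char × Nat :=
  cs.foldl (mstep a b) st

-- the stack never contains b directly above a ("reversed stack is pattern-free")
def good (a b : Char) : List Char → Prop
  | [] => True
  | [_] => True
  | u :: v :: r => ¬(u = b ∧ v = a) ∧ good a b (v :: r)

theorem good_tail (a b : Char) (x : Char) (st : List Char)
    (h : good a b (x :: st)) : good a b st := by
  cases st with
  | nil => trivial
  | cons y r => exact h.2

theorem good_mstep (a b : Char) (st : List Char) (k : Nat) (c : Char)
    (h : good a b st) : good a b (mstep a b (st, k) c).1 := by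
  cases st with
  | nil => trivial
  | cons x s =>
    simp only [mstep]
    split
    · exact good_tail a b x s h
    · exact ⟨fun hc => ‹¬(x = a ∧ c = b)› ⟨hc.2, hc.1⟩, h⟩

theorem mrun_pair (a b : Char) (st : List Char) (k : Nat) (cs : List Char)
    (h : good a b st) : mrun a b (st, k) (a :: b :: cs) = mrun a b (st, k + 1) cs := by
  cases st with
  | nil => simp [mrun, List.foldl, mstep]
  | cons x s =>
    by_cases hx : x = a ∧ a = b
    · -- first char pops (only possible when a = b); the stack below cannot hold another a
      cases s with
      | nil => simp [mrun, List.foldl, mstep, hx.1, hx.2]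
      | cons y r =>
        have hxb : x = b := hx.1.trans hx.2
        have hy : y ≠ a := fun hya => h.1 ⟨hxb, hya⟩
        have hy' : y ≠ b := fun h' => hy (h'.trans hx.2.symm)
        simp [mrun, List.foldl, mstep, hx.1, hx.2, hy']
    · -- first char pushes, second pops it
      simp [mrun, List.foldl, mstep, hx]

theorem mstep_add (a b : Char) (st : List Char) (k m : Nat) (c : Char) :
    mstep a b (st, k + m) c = ((mstep a b (st, k) c).1, (mstep a b (st, k) c).2 + m) := by
  cases st with
  | nil => simp [mstep]
  | cons x s => simp only [mstep]; split <;> simp <;> omega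

theorem mrun_add (a b : Char) : ∀ (cs : List Char) (st : List Char) (k m : Nat),
    mrun a b (st, k + m) cs = ((mrun a b (st, k) cs).1, (mrun a b (st, k) cs).2 + m) := by
  intro cs
  induction cs with
  | nil => intro st k m; rfl
  | cons c rest ih =>
    intro st k m
    simp only [mrun, List.foldl] at *
    rw [mstep_add]
    rcases h : mstep a b (st, k) c with ⟨st₁, k₁⟩
    exact ih st₁ k₁ m

theorem mrun_sweep (a b : Char) : ∀ (cs : List Char) (st : List Char) (k : Nat),
    good a b st → mrun a b (st, k) cs = mrun a b (st, k + (sweep a b cs).1) (sweep a b cs).2 := by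
  intro cs
  induction cs using sweep.induct a b with
  | case1 => intro st k h; simp [sweep]
  | case2 c => intro st k h; simp [sweep]
  | case3 c d rest hcd ih =>
    intro st k h
    obtain ⟨hc, hd⟩ := hcd
    subst hc
    subst hd
    rw [mrun_pair c d st k rest h, ih st (k + 1) h]
    simp only [sweep, and_self, if_pos]
    congr 2
    omega
  | case4 c d rest hcd ih =>
    intro st k h
    have step1 : mrun a b (st, k) (c :: d :: rest) = mrun a b (mstep a b (st, k) c) (d :: rest) := rfl
    rcases hm : mstep a b (st, k) c with ⟨st₁, k₁⟩
    have hg : good a b st₁ := by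
      have := good_mstep a b st k c h
      rw [hm] at this; exact this
    rw [step1, hm, ih st₁ k₁ hg]
    simp only [sweep, if_neg hcd]
    show _ = mrun a b (st, k + (sweep a b (d :: rest)).1) (c :: (sweep a b (d :: rest)).2)
    have : mrun a b (st, k + (sweep a b (d :: rest)).1) (c :: (sweep a b (d :: rest)).2)
        = mrun a b (mstep a b (st, k + (sweep a b (d :: rest)).1) c) (sweep a b (d :: rest)).2 := rfl
    rw [this, mstep_add, hm]

theorem mrun_nosweep (a b : Char) : ∀ (cs : List Char) (st : List Char) (k : Nat),
    good a b st → (∀ x s', st = x :: s' → ∀ d r, cs = d :: r → ¬(x = a ∧ d = b)) →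
    (sweep a b cs).1 = 0 → mrun a b (st, k) cs = (cs.reverse ++ st, k) := by
  intro cs
  induction cs with
  | nil => intro st k _ _ _; simp [mrun]
  | cons c rest ih =>
    intro st k hg hno hs
    have hpush : mstep a b (st, k) c = (c :: st, k) := by
      cases st with
      | nil => rfl
      | cons x s =>
        simp only [mstep, if_neg (hno x s rfl c rest rfl)]
    have step1 : mrun a b (st, k) (c :: rest) = mrun a b (mstep a b (st, k) c) rest := rfl
    rw [step1, hpush, ih (c :: st) k]
    · simp
    · have := good_mstep a b st k c hg
      rw [hpush] at this; exact this
    · rintro x s' hx d r hr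
      injection hx with h1 h2
      subst h1
      subst h2
      intro hcd
      rw [hr] at hs
      simp [sweep, if_pos hcd] at hs
    · cases rest with
      | nil => simp [sweep]
      | cons d r =>
        by_cases hcd : c = a ∧ d = b
        · simp [sweep, if_pos hcd] at hs
        · simpa [sweep, if_neg hcd] using hs

-- B's loop computes mrun from the empty stack
theorem good_nil (a b : Char) : good a b [] := trivial

theorem solveAltLoop_eq (a b : Char) (p : Int) : ∀ (tot : Int) (cs : List Char),
    solveAltLoop a b p tot cs = (tot + ((mrun a b ([], 0) cs).2 : Int) * p, (mrun a b ([], 0) cs).1.reverse) := by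
  intro tot cs
  induction tot, cs using solveAltLoop.induct a b p with
  | case1 tot cs h =>
    have hm : mrun a b ([], 0) cs = (cs.reverse ++ [], 0) :=
      mrun_nosweep a b cs [] 0 (good_nil a b) (by rintro x s' ⟨⟩) h
    rw [solveAltLoop, dif_pos h, hm]
    simp
  | case2 tot cs h ih =>
    rw [solveAltLoop, dif_neg h, ih]
    have hs : mrun a b ([], 0) cs
        = mrun a b ([], 0 + (sweep a b cs).1) (sweep a b cs).2 :=
      mrun_sweep a b cs [] 0 (good_nil a b)
    rw [hs, mrun_add]
    simp only [Prod.mk.injEq]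
    exact ⟨by push_cast; ring, trivial⟩

theorem take_succ_set {α : Type} (l : List α) (w : Nat) (c : α) (hw : w < l.length) :
    (l.set w c).take (w + 1) = l.take w ++ [c] := by
  rw [List.take_set, List.take_add_one, List.set_append]
  simp [List.length_take, Nat.min_eq_left (Nat.le_of_lt hw), List.getElem?_eq_getElem hw]

theorem take_set_of_le {α : Type} (l : List α) (n w : Nat) (c : α) (h : n ≤ w) :
    (l.set w c).take n = l.take n := by
  rw [List.take_set, List.set_eq_of_length_le (by simp; omega)]

theorem mstep_length (a b : Char) (st : List Char) (k : Nat) (c : Char) :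
    (mstep a b (st, k) c).1.length ≤ st.length + 1 := by
  cases st with
  | nil => simp [mstep]
  | cons x s => simp only [mstep]; split <;> simp <;> omega

theorem mrun_length (a b : Char) : ∀ (cs st : List Char) (k : Nat),
    (mrun a b (st, k) cs).1.length ≤ st.length + cs.length := by
  intro cs
  induction cs with
  | nil => intro st k; simp [mrun]
  | cons c rest ih =>
    intro st k
    have step1 : mrun a b (st, k) (c :: rest) = mrun a b (mstep a b (st, k) c) rest := rfl
    rw [step1]
    rcases hm : mstep a b (st, k) c with ⟨st₁, k₁⟩
    have h1 : st₁.length ≤ st.length + 1 := by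
      have h := mstep_length a b st k c
      rw [hm] at h
      simpa using h
    have h2 := ih st₁ k₁
    simp only [List.length_cons]
    omega

-- A's fold simulates mrun through the compacted array
theorem solve_sim (a b : Char) (p : Int) (s0 : List Char) : ∀ r ≤ s0.length,
    ∃ arr : List Char,
      (List.range r).foldl (fun st i => solveStep a b st i p) (s0, 0, (0 : Int)) =
        (arr, (mrun a b ([], 0) (s0.take r)).1.length, ((mrun a b ([], 0) (s0.take r)).2 : Int) * p) ∧
      arr.length = s0.length ∧
      arr.take (mrun a b ([], 0) (s0.take r)).1.length = (mrun a b ([], 0) (s0.take r)).1.reverse ∧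
      arr.drop r = s0.drop r := by
  intro r
  induction r with
  | zero =>
    intro _
    exact ⟨s0, by simp [mrun], rfl, by simp [mrun], rfl⟩
  | succ r ih =>
    intro hr1
    have hrlt : r < s0.length := by omega
    obtain ⟨arr, hfold, hlen, htake, hdrop⟩ := ih (by omega)
    rcases hM : mrun a b ([], 0) (s0.take r) with ⟨st, k⟩
    rw [hM] at hfold htake
    have hstlen : st.length ≤ r := by
      have h := mrun_length a b (s0.take r) [] 0
      rw [hM] at h
      simp only [List.length_nil, List.length_take, Nat.zero_add] at h
      omega
    have harr_r : arr[r]? = some (s0[r]'hrlt) := by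
      have h0 : (arr.drop r)[0]? = (s0.drop r)[0]? := by rw [hdrop]
      rw [List.getElem?_drop, List.getElem?_drop] at h0
      simpa [List.getElem?_eq_getElem hrlt] using h0
    have hget : arr.getD r ' ' = s0[r]'hrlt := by
      rw [List.getD_eq_getElem?_getD, harr_r]; rfl
    have htail : s0.take (r + 1) = s0.take r ++ [s0[r]'hrlt] := by
      rw [List.take_add_one, List.getElem?_eq_getElem hrlt]; rfl
    have hmrun1 : mrun a b ([], 0) (s0.take (r + 1)) = mstep a b (st, k) (s0[r]'hrlt) := by
      rw [htail]
      show (s0.take r ++ [s0[r]'hrlt]).foldl (mstep a b) ([], 0) = _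
      rw [List.foldl_append, show (s0.take r).foldl (mstep a b) ([], 0) = (st, k) from hM]
      rfl
    have hfold' : (List.range (r + 1)).foldl (fun st i => solveStep a b st i p) (s0, 0, (0 : Int)) =
        solveStep a b (arr, st.length, (k : Int) * p) r p := by
      rw [List.range_succ, List.foldl_append, hfold]; rfl
    have hdrop1 : arr.drop (r + 1) = s0.drop (r + 1) := by
      have h : (arr.drop r).drop 1 = (s0.drop r).drop 1 := by rw [hdrop]
      simpa [List.drop_drop] using h
    have hsetdrop : ∀ w : Nat, w ≤ r → (arr.set w (s0[r]'hrlt)).drop (r + 1) = s0.drop (r + 1) := by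
      intro w hw
      rw [List.drop_set, if_pos (by omega)]
      exact hdrop1
    rw [hmrun1]
    cases st with
    | nil =>
      simp only [List.length_nil] at hfold'
      have hsv : solveStep a b (arr, 0, (k : Int) * p) r p = (arr.set 0 (s0[r]'hrlt), 1, (k : Int) * p) := by
        simp [solveStep, List.getD_eq_getElem?_getD, harr_r]
      refine ⟨arr.set 0 (s0[r]'hrlt), ?_, by simp [hlen], ?_, hsetdrop 0 (by omega)⟩
      · rw [hfold', hsv]
        simp [mstep]
      · show (arr.set 0 (s0[r]'hrlt)).take (mstep a b ([], k) (s0[r]'hrlt)).1.length = _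
        have h1 := take_succ_set arr 0 (s0[r]'hrlt) (by omega)
        simp only [mstep]
        simpa using h1
    | cons x s' =>
      have hxlt : s'.length < arr.length := by
        rw [hlen]
        simp only [List.length_cons] at hstlen
        omega
      have harrx : arr[s'.length]? = some x := by
        have h1 : (arr.take (s'.length + 1))[s'.length]? = (s'.reverse ++ [x])[s'.length]? := by
          rw [show arr.take (s'.length + 1) = (x :: s').reverse from by simpa using htake]
          simp
        rw [List.getElem?_take, if_pos (by omega)] at h1
        rw [h1, List.getElem?_append_right (by simp), List.length_reverse]
        simp
      have hgx : arr.getD s'.length ' ' = x := by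
        rw [List.getD_eq_getElem?_getD, harrx]; rfl
      -- the compacted prefix of length w: arr.set w c with w = s'.length + 1
      have htake' : (arr.set (s'.length + 1) (s0[r]'hrlt)).take (s'.length + 1 + 1)
          = s'.reverse ++ [x] ++ [s0[r]'hrlt] := by
        rw [take_succ_set arr (s'.length + 1) (s0[r]'hrlt) (by rw [hlen]; simp only [List.length_cons] at hstlen; omega),
          show arr.take (s'.length + 1) = (x :: s').reverse from by simpa using htake]
        simp
      by_cases hpop : x = a ∧ (s0[r]'hrlt) = b
      · -- pop: A: write then retract two; machine: pop
        have hsv : solveStep a b (arr, (x :: s').length, (k : Int) * p) r p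
            = (arr.set (s'.length + 1) (s0[r]'hrlt), s'.length, (k : Int) * p + p) := by
          simp only [solveStep, List.length_cons, hget]
          rw [if_pos]
          · simp
          refine ⟨by omega, ?_, ?_⟩
          · show (arr.set (s'.length + 1) (s0[r]'hrlt)).getD (s'.length + 1 + 1 - 1) ' ' = b
            have : (arr.set (s'.length + 1) (s0[r]'hrlt))[s'.length + 1]? = some (s0[r]'hrlt) :=
              List.getElem?_set_self (by rw [hlen]; simp only [List.length_cons] at hstlen; omega)
            rw [List.getD_eq_getElem?_getD, show s'.length + 1 + 1 - 1 = s'.length + 1 from rfl, this]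
            exact hpop.2
          · show (arr.set (s'.length + 1) (s0[r]'hrlt)).getD (s'.length + 1 + 1 - 2) ' ' = a
            rw [List.getD_eq_getElem?_getD, show s'.length + 1 + 1 - 2 = s'.length from rfl,
              List.getElem?_set_ne (by omega), harrx]
            exact hpop.1
        have hms : mstep a b (x :: s', k) (s0[r]'hrlt) = (s', k + 1) := by
          simp only [mstep]
          rw [if_pos ⟨hpop.1, hpop.2⟩]
        rw [hms]
        refine ⟨arr.set (s'.length + 1) (s0[r]'hrlt), ?_, by simp [hlen], ?_, hsetdrop _ (by simp only [List.length_cons] at hstlen; omega)⟩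
        · rw [hfold', hsv]
          have hkp : (k : Int) * p + p = ((k + 1 : Nat) : Int) * p := by push_cast; ring
          rw [hkp]
        · rw [take_set_of_le arr s'.length (s'.length + 1) _ (by omega)]
          have h2 : arr.take s'.length = ((x :: s').reverse).take s'.length := by
            rw [← htake]
            simp [List.take_take]
          rw [h2]
          simp [List.take_append_of_le_length]
      · -- push
        have hsv : solveStep a b (arr, (x :: s').length, (k : Int) * p) r p
            = (arr.set (s'.length + 1) (s0[r]'hrlt), s'.length + 1 + 1, (k : Int) * p) := by
          simp only [solveStep, List.length_cons, hget]
          split_ifs with hcnd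
          · exfalso
            apply hpop
            obtain ⟨-, h1, h2⟩ := hcnd
            constructor
            · rw [List.getD_eq_getElem?_getD, show s'.length + 1 + 1 - 2 = s'.length from rfl,
                List.getElem?_set_ne (by omega), harrx] at h2
              exact h2
            · rw [List.getD_eq_getElem?_getD, show s'.length + 1 + 1 - 1 = s'.length + 1 from rfl,
                List.getElem?_set_self (by rw [hlen]; simp only [List.length_cons] at hstlen; omega)] at h1
              exact h1
          · rfl
        have hms : mstep a b (x :: s', k) (s0[r]'hrlt) = ((s0[r]'hrlt) :: x :: s', k) := by
          simp only [mstep]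
          rw [if_neg hpop]
        rw [hms]
        refine ⟨arr.set (s'.length + 1) (s0[r]'hrlt), ?_, by simp [hlen], ?_, hsetdrop _ (by simp only [List.length_cons] at hstlen; omega)⟩
        · rw [hfold', hsv]
          rfl
        · show (arr.set (s'.length + 1) (s0[r]'hrlt)).take (s'.length + 1 + 1) = _
          rw [htake']
          simp

-- ===== VERDICT (by name: the statement is the Claim_ definition above) =====
theorem solve_spec : Claim_equal_solve := by
  unfold Claim_equal_solve
  intro s t p _ _
  unfold Spec_solve solve solve_alt
  obtain ⟨arr, hfold, hlen, htake, hdrop⟩ :=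
    solve_sim (t.toList.getD 0 ' ') (t.toList.getD 1 ' ') p s.toList s.toList.length le_rfl
  rw [List.take_length] at hfold htake
  simp only
  rw [hfold, solveAltLoop_eq]
  simp only [List.getD_eq_getElem?_getD] at htake
  simp [htake]
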